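-- pv_equiv track=rewrite | github.com/yaohusama/ai | OCR接口/extraction_info.py | get_text_word
-- ===== SOURCE A (Python) =====
-- def get_text_word(projections):
--     text_word = [ ]
--     start = 0
--     for index, projection in enumerate(projections):
--         if projection>0 and start==0:
--             start_location = index
--             start = 1
--         if projection==0 and start==1:
--             end_location = index
--             start = 0
--             if len(text_word)>0 and start_location-text_word[-1][1]<3:
--                 text_word[-1] = (text_word[-1][0],end_location)
--             else:
--                 text_word.append((start_location,end_location))
--     return text_word
-- ===== SOURCE B (Python) =====
-- def get_text_word(projections):
--     # pass 1: raw runs of positive values; a run still open at the end is dropped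
--     segments = []
--     start = None
--     for i, p in enumerate(projections):
--         if start is None:
--             if p > 0:
--                 start = i
--         elif p == 0:
--             segments.append((start, i))
--             start = None
--     # pass 2: merge raw segments whose gap to the previous kept interval is < 3
--     result = []
--     for s, e in segments:
--         if result and s - result[-1][1] < 3:
--             result[-1] = (result[-1][0], e)
--         else:
--             result.append((s, e))
--     return result
-- ===== Notes on version B (the rewrite author's own statement) =====
-- stated objective: alternative
-- what changed: B splits A's single stateful loop into two passes: first collect raw positive runs (dropping a run still open at end of input), then fold a separate gap<3 merge over the collected segments.
import Mathlib
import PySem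

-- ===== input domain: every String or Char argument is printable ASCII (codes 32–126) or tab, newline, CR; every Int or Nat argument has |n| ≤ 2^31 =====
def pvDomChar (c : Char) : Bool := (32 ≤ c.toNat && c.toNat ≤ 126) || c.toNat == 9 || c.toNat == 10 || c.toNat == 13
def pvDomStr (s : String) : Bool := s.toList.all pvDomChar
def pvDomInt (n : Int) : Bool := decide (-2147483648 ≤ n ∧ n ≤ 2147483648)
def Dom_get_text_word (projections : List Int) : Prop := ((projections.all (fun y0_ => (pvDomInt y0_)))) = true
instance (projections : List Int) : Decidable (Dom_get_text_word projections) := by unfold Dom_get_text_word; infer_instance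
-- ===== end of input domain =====

-- B is an alternative decomposition (raw-run scan, then a separate merge fold); same O(n) cost; return value only (neither version mutates its argument).

-- ===== PORT A =====
-- A's single loop: state = (text_word, start flag, start_location); the two sequential
-- Python `if`s become nested ifs (the second test reads the state updated by the first).
def get_text_word_go (tw : List (Int × Int)) (start sl i : Int) : List Int → List (Int × Int)
  | [] => tw
  | p :: rest =>
    if p > 0 ∧ start = 0 then
      -- start_location := i, start := 1
      if p = 0 ∧ (1 : Int) = 1 then
        get_text_word_go
          (if tw.length > 0 ∧ i - (tw.getLast?.getD (0, 0)).2 < 3 then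
             tw.dropLast ++ [((tw.getLast?.getD (0, 0)).1, i)]
           else tw ++ [(i, i)]) 0 i (i + 1) rest
      else get_text_word_go tw 1 i (i + 1) rest
    else
      if p = 0 ∧ start = 1 then
        get_text_word_go
          (if tw.length > 0 ∧ sl - (tw.getLast?.getD (0, 0)).2 < 3 then
             tw.dropLast ++ [((tw.getLast?.getD (0, 0)).1, i)]
           else tw ++ [(sl, i)]) 0 sl (i + 1) rest
      else get_text_word_go tw start sl (i + 1) rest

def get_text_word (projections : List Int) : List (Int × Int) :=
  get_text_word_go [] 0 0 0 projections

-- ===== PORT B =====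
-- pass 1: raw positive runs (an open run at the end of input is dropped)
def seg_scan (acc : List (Int × Int)) (start : Option Int) (i : Int) : List Int → List (Int × Int)
  | [] => acc
  | p :: rest =>
    match start with
    | none => seg_scan acc (if p > 0 then some i else none) (i + 1) rest
    | some s =>
      if p = 0 then seg_scan (acc ++ [(s, i)]) none (i + 1) rest
      else seg_scan acc (some s) (i + 1) rest

-- pass 2: one merge step of the fold
def merge_step (res : List (Int × Int)) (seg : Int × Int) : List (Int × Int) :=
  match res.getLast? with
  | some (a, b) => if seg.1 - b < 3 then res.dropLast ++ [(a, seg.2)] else res ++ [seg]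
  | none => res ++ [seg]

def get_text_word_alt (projections : List Int) : List (Int × Int) :=
  (seg_scan [] none 0 projections).foldl merge_step []

-- ===== PRECONDITION & SPEC =====
def Spec_get_text_word (projections : List Int) (out : List (Int × Int)) : Prop := out = get_text_word_alt projections
instance (projections : List Int) (out : List (Int × Int)) : Decidable (Spec_get_text_word projections out) := by unfold Spec_get_text_word; infer_instance

-- ===== CLAIM (what is proved, stated in full; the proofs are below) =====
def Claim_equal_get_text_word : Prop := ∀ (projections : List Int), Dom_get_text_word projections → Spec_get_text_word projections (get_text_word projections)

-- ===== LEMMAS AND PROOFS =====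
lemma seg_scan_prefix (ps : List Int) : ∀ (acc : List (Int × Int)) (st : Option Int) (i : Int),
    seg_scan acc st i ps = acc ++ seg_scan [] st i ps := by
  induction ps with
  | nil => intro acc st i; cases st <;> simp [seg_scan]
  | cons p rest ih =>
    intro acc st i
    cases st with
    | none =>
      simp only [seg_scan]
      exact ih acc _ _
    | some s =>
      by_cases h : p = 0
      · simp only [seg_scan, if_pos h, List.nil_append]
        rw [ih (acc ++ [(s, i)]) none (i + 1), ih [(s, i)] none (i + 1)]
        simp
      · simp only [seg_scan, if_neg h]
        exact ih acc _ _

lemma merge_step_eq (tw : List (Int × Int)) (s e : Int) :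
    (if tw.length > 0 ∧ s - (tw.getLast?.getD (0, 0)).2 < 3 then
       tw.dropLast ++ [((tw.getLast?.getD (0, 0)).1, e)]
     else tw ++ [(s, e)]) = merge_step tw (s, e) := by
  rcases h : tw.getLast? with _ | ⟨a, b⟩
  · have : tw = [] := List.getLast?_eq_none_iff.mp h
    subst this; simp [merge_step]
  · have hne : tw ≠ [] := by rintro rfl; simp at h
    have hlen : tw.length > 0 := List.length_pos_iff.mpr hne
    simp [merge_step, h, hlen]

lemma main_lemma (ps : List Int) : ∀ (tw : List (Int × Int)) (i : Int),
    (∀ sl, get_text_word_go tw 0 sl i ps = (seg_scan [] none i ps).foldl merge_step tw) ∧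
    (∀ s, get_text_word_go tw 1 s i ps = (seg_scan [] (some s) i ps).foldl merge_step tw) := by
  induction ps with
  | nil =>
    intro tw i
    exact ⟨fun _ => by simp [get_text_word_go, seg_scan],
           fun _ => by simp [get_text_word_go, seg_scan]⟩
  | cons p rest ih =>
    intro tw i
    constructor
    · intro sl
      simp only [get_text_word_go, seg_scan]
      by_cases hp : p > 0
      · rw [if_pos (⟨hp, trivial⟩ : p > 0 ∧ True),
            if_neg (fun h => absurd h.1 (by omega) : ¬(p = 0 ∧ True)),
            if_pos hp]
        exact (ih tw (i + 1)).2 i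
      · rw [if_neg (fun h => hp h.1 : ¬(p > 0 ∧ True)),
            if_neg (fun h => absurd h.2 (by norm_num) : ¬(p = 0 ∧ (0 : Int) = 1)),
            if_neg hp]
        exact (ih tw (i + 1)).1 sl
    · intro s
      simp only [get_text_word_go, seg_scan]
      rw [if_neg (fun h => absurd h.2 (by norm_num) : ¬(p > 0 ∧ (1 : Int) = 0))]
      by_cases hp : p = 0
      · rw [if_pos (⟨hp, trivial⟩ : p = 0 ∧ True), if_pos hp]
        simp only [List.nil_append]
        rw [seg_scan_prefix rest [(s, i)] none (i + 1)]
        simp only [List.cons_append, List.nil_append, List.foldl_cons]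
        rw [merge_step_eq]
        exact (ih (merge_step tw (s, i)) (i + 1)).1 s
      · rw [if_neg (fun h => hp h.1 : ¬(p = 0 ∧ True)), if_neg hp]
        exact (ih tw (i + 1)).2 s

-- ===== VERDICT (by name: the statement is the Claim_ definition above) =====
theorem get_text_word_spec : Claim_equal_get_text_word := by
  intro projections _
  unfold Spec_get_text_word get_text_word get_text_word_alt
  exact (main_lemma projections [] 0).1 0
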